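-- pv_equiv track=rewrite | github.com/ZHDKk/driver_io | utils/helpers.py | node_path2id4
-- ===== SOURCE A (Python) =====
-- def node_path2id4(input_str):
--     parts = [p for p in input_str.split('/') if p]
--     processed = []
--
--     for part in parts:
--         if part.isdigit() and processed and processed[-1][1] is None:
--             prev_name, _ = processed.pop()
--             processed.append((prev_name, part))
--         else:
--             processed.append((part, None))
--
--     path = []
--     for name, index in processed:
--         if index is not None:
--             path.append(f'"{name}"[{index}]')
--         else:
--             path.append(f'"{name}"')
--
--     return f'ns=3;s={".".join(path)}'
-- ===== SOURCE B (Python) =====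
-- def node_path2id4(input_str):
--     parts = [p for p in input_str.split('/') if p]
--     path = []
--     i = 0
--     n = len(parts)
--     while i < n:
--         name = parts[i]
--         if i + 1 < n and parts[i + 1].isdigit():
--             path.append(f'"{name}"[{parts[i + 1]}]')
--             i += 2
--         else:
--             path.append(f'"{name}"')
--             i += 1
--     return f'ns=3;s={".".join(path)}'
-- ===== Notes on version B (the rewrite author's own statement) =====
-- stated objective: simpler
-- what changed: Replaces A's two passes (a fold that pops/re-appends (name,index) pairs off a stack, then a formatting pass) by a single index loop with one-element lookahead that emits each formatted fragment directly.
import Mathlib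
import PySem

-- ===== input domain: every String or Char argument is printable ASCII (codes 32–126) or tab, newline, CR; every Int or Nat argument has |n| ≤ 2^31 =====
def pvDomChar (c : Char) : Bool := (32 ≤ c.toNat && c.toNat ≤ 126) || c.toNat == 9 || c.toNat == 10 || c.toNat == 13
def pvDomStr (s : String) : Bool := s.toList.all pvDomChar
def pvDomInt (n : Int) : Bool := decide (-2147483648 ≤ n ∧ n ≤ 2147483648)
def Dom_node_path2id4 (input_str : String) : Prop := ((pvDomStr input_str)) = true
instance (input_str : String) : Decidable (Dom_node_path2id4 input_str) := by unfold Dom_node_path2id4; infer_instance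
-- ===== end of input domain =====

-- B replaces A's two passes (a fold that pops/re-appends (name,index) pairs, then a
-- formatting pass) by one lookahead traversal emitting formatted fragments directly (simpler).

-- ===== PORT A =====
-- one loop step of A: merge a digit part into an open previous entry, else append (part, None)
def goA (acc : List (String × Option String)) (part : String) : List (String × Option String) :=
  if PySem.Str.strIsdigit part then
    match acc.getLast? with
    | some (pn, none) => acc.dropLast ++ [(pn, some part)]
    | _ => acc ++ [(part, none)]
  else acc ++ [(part, none)]

def fmtA (p : String × Option String) : String :=
  match p.2 with
  | some idx => "\"" ++ p.1 ++ "\"[" ++ idx ++ "]"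
  | none => "\"" ++ p.1 ++ "\""

def node_path2id4 (input_str : String) : String :=
  let parts := ((PySem.Str.split? input_str "/").getD []).filter (fun p => p ≠ "")
  let processed := parts.foldl goA []
  let path := processed.foldl (fun acc p => acc ++ [fmtA p]) []
  "ns=3;s=" ++ PySem.Str.join "." path

-- ===== PORT B =====
-- Source B's index loop with one-element lookahead, as structural recursion on the parts list
def altLoop : List String → List String
  | [] => []
  | [n] => ["\"" ++ n ++ "\""]
  | n :: m :: rest =>
    if PySem.Str.strIsdigit m then ("\"" ++ n ++ "\"[" ++ m ++ "]") :: altLoop rest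
    else ("\"" ++ n ++ "\"") :: altLoop (m :: rest)

def node_path2id4_alt (input_str : String) : String :=
  let parts := ((PySem.Str.split? input_str "/").getD []).filter (fun p => p ≠ "")
  "ns=3;s=" ++ PySem.Str.join "." (altLoop parts)

-- ===== PRECONDITION & SPEC =====
def Spec_node_path2id4 (input_str : String) (out : String) : Prop := out = node_path2id4_alt input_str
instance (input_str : String) (out : String) : Decidable (Spec_node_path2id4 input_str out) := by unfold Spec_node_path2id4; infer_instance

-- ===== CLAIM (what is proved, stated in full; the proofs are below) =====
def Claim_equal_node_path2id4 : Prop := ∀ (input_str : String), Dom_node_path2id4 input_str → Spec_node_path2id4 input_str (node_path2id4 input_str)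

-- ===== LEMMAS AND PROOFS =====
theorem goA_ne_nil (acc : List (String × Option String)) (p : String) : goA acc p ≠ [] := by
  unfold goA
  split
  · split <;> simp
  · simp

theorem goA_append (acc X : List (String × Option String)) (p : String) (hX : X ≠ []) :
    goA (acc ++ X) p = acc ++ goA X p := by
  rcases List.eq_nil_or_concat X with rfl | ⟨ys, y, rfl⟩
  · exact absurd rfl hX
  · rcases y with ⟨a, b⟩
    unfold goA
    simp only [List.concat_eq_append, ← List.append_assoc, List.getLast?_concat, List.dropLast_concat]
    cases b <;> split <;> simp

theorem foldl_goA_append (rest : List String) (acc X : List (String × Option String))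
    (hX : X ≠ []) : rest.foldl goA (acc ++ X) = acc ++ rest.foldl goA X := by
  induction rest generalizing X with
  | nil => rfl
  | cons r rs ih =>
      simp only [List.foldl_cons, goA_append acc X r hX]
      exact ih (goA X r) (goA_ne_nil X r)

theorem goA_nil (p : String) : goA [] p = [(p, none)] := by
  unfold goA; split <;> rfl

theorem goA_closed (a : String) (b : String) (r : String) :
    goA [(a, some b)] r = [(a, some b), (r, none)] := by
  unfold goA; split <;> rfl

theorem foldl_goA_closed (rest : List String) (a b : String) :
    rest.foldl goA [(a, some b)] = (a, some b) :: rest.foldl goA [] := by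
  cases rest with
  | nil => rfl
  | cons r rs =>
      simp only [List.foldl_cons, goA_closed, goA_nil]
      exact foldl_goA_append rs [(a, some b)] [(r, none)] (by simp)

theorem main_path (parts : List String) :
    (parts.foldl goA []).map fmtA = altLoop parts := by
  induction parts using altLoop.induct with
  | case1 => rfl
  | case2 n => simp [altLoop, goA_nil, fmtA]
  | case3 n m rest h ih =>
      have step : (n :: m :: rest).foldl goA [] = rest.foldl goA [(n, some m)] := by
        simp only [List.foldl_cons, goA_nil]
        congr 1
        unfold goA
        rw [if_pos h]
        rfl
      have h' : PySem.Chars.strIsdigit m.toList = true := by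
        simpa using h
      rw [step, foldl_goA_closed, List.map_cons, ih]
      simp [altLoop, fmtA, h']
  | case4 n m rest h ih =>
      have step : (n :: m :: rest).foldl goA [] = [(n, none)] ++ (m :: rest).foldl goA [] := by
        simp only [List.foldl_cons, goA_nil]
        have : goA [(n, none)] m = [(n, none)] ++ [(m, none)] := by
          unfold goA; rw [if_neg (by simpa using h)]
        rw [this, foldl_goA_append rest [(n, none)] [(m, none)] (by simp)]
      have h' : PySem.Chars.strIsdigit m.toList = false := by
        simpa using h
      rw [step, List.map_append, List.map_cons, List.map_nil, ih]
      simp [altLoop, fmtA, h']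

-- ===== VERDICT (by name: the statement is the Claim_ definition above) =====
theorem node_path2id4_spec : Claim_equal_node_path2id4 := by
  intro input_str _
  unfold Spec_node_path2id4 node_path2id4 node_path2id4_alt
  simp only [PySem.List.foldl_append_singleton_eq_map, List.nil_append]
  rw [main_path]
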